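-- pv_equiv track=rewrite | github.com/Lua-Lapin/HANAFUDA | Yaku.py | countYaku
-- ===== SOURCE A (Python) =====
-- def countYaku(cards):
--   output = []
--   output.append(len([s for s in cards if ("1a" in s)or("3a" in s)or("8a" in s)or("Ba" in s)or("Ca" in s)]))
--   output.append(len([s for s in cards if ("3a" in s)or("8a" in s)or("Aa" in s)]))
--   output.append(len([s for s in cards if ("1b" in s)or("2b" in s)or("3b" in s)]))
--   output.append(len([s for s in cards if ("6b" in s)or("9b" in s)or("Ab" in s)]))
--   output.append(len([s for s in cards if ("4b" in s)or("5b" in s)or("7b" in s)or("Bc" in s)]))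
--   output.append(len([s for s in cards if ("8a" in s)or("9a" in s)]))
--   output.append(len([s for s in cards if ("3a" in s)or("9a" in s)]))
--   output.append(len([s for s in cards if ("2a" in s)or("4a" in s)or("5a" in s)or("6a" in s)or("7a" in s)or("9a" in s)or("Aa" in s)or("Bb" in s)]))
--   output.append(len([s for s in cards if ("d" in s)or("c" in s)and("B" not in s)or("12b" in s)]))
--
--   return output
-- ===== SOURCE B (Python) =====
-- _PATTERNS = [
--     ["1a", "3a", "8a", "Ba", "Ca"],
--     ["3a", "8a", "Aa"],
--     ["1b", "2b", "3b"],
--     ["6b", "9b", "Ab"],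
--     ["4b", "5b", "7b", "Bc"],
--     ["8a", "9a"],
--     ["3a", "9a"],
--     ["2a", "4a", "5a", "6a", "7a", "9a", "Aa", "Bb"],
-- ]
--
-- def _indicator(s):
--     ind = [1 if any(p in s for p in pats) else 0 for pats in _PATTERNS]
--     ind.append(1 if ("d" in s) or (("c" in s) and ("B" not in s)) or ("12b" in s) else 0)
--     return ind
--
-- def countYaku(cards):
--     totals = [0] * 9
--     for s in cards:
--         totals = [t + i for t, i in zip(totals, _indicator(s))]
--     return totals
-- ===== Notes on version B (the rewrite author's own statement) =====
-- stated objective: simpler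
-- what changed: Replaces nine separate list-comprehension scans with a single table-driven pass: each card is mapped to a 9-entry 0/1 indicator vector built from a pattern table (the exclusion-bearing ninth condition kept explicit), and these vectors are summed elementwise.
import Mathlib
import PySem

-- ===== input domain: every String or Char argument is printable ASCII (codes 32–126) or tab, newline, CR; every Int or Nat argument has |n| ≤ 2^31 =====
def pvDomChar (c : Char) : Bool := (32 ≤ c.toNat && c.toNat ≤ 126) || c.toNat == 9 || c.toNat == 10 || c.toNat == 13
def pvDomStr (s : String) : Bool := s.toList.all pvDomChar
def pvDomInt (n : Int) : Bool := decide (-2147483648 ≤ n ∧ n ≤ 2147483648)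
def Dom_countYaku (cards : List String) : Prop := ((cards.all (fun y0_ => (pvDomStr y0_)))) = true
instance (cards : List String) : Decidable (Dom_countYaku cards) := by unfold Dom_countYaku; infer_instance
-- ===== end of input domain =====

-- B replaces A's nine separate filter scans with a single table-driven pass summing per-card 0/1 indicator vectors (objective: simpler).

-- ===== PORT A =====
-- A: nine list comprehensions, each a filter over cards, length appended in order.
def yaku1 (s : String) : Bool :=
  PySem.Str.isIn "1a" s || PySem.Str.isIn "3a" s || PySem.Str.isIn "8a" s || PySem.Str.isIn "Ba" s || PySem.Str.isIn "Ca" s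
def yaku2 (s : String) : Bool :=
  PySem.Str.isIn "3a" s || PySem.Str.isIn "8a" s || PySem.Str.isIn "Aa" s
def yaku3 (s : String) : Bool :=
  PySem.Str.isIn "1b" s || PySem.Str.isIn "2b" s || PySem.Str.isIn "3b" s
def yaku4 (s : String) : Bool :=
  PySem.Str.isIn "6b" s || PySem.Str.isIn "9b" s || PySem.Str.isIn "Ab" s
def yaku5 (s : String) : Bool :=
  PySem.Str.isIn "4b" s || PySem.Str.isIn "5b" s || PySem.Str.isIn "7b" s || PySem.Str.isIn "Bc" s
def yaku6 (s : String) : Bool :=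
  PySem.Str.isIn "8a" s || PySem.Str.isIn "9a" s
def yaku7 (s : String) : Bool :=
  PySem.Str.isIn "3a" s || PySem.Str.isIn "9a" s
def yaku8 (s : String) : Bool :=
  PySem.Str.isIn "2a" s || PySem.Str.isIn "4a" s || PySem.Str.isIn "5a" s || PySem.Str.isIn "6a" s ||
  PySem.Str.isIn "7a" s || PySem.Str.isIn "9a" s || PySem.Str.isIn "Aa" s || PySem.Str.isIn "Bb" s
-- Python precedence: d or (c and not B) or 12b
def yaku9 (s : String) : Bool :=
  PySem.Str.isIn "d" s || (PySem.Str.isIn "c" s && !PySem.Str.isIn "B" s) || PySem.Str.isIn "12b" s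

def countYaku (cards : List String) : List Int :=
  [((cards.filter yaku1).length : Int),
   ((cards.filter yaku2).length : Int),
   ((cards.filter yaku3).length : Int),
   ((cards.filter yaku4).length : Int),
   ((cards.filter yaku5).length : Int),
   ((cards.filter yaku6).length : Int),
   ((cards.filter yaku7).length : Int),
   ((cards.filter yaku8).length : Int),
   ((cards.filter yaku9).length : Int)]

-- ===== PORT B =====
-- B: a pattern table; each card yields a 9-entry indicator vector, summed elementwise by one fold.
def pvPatterns : List (List String) :=
  [["1a", "3a", "8a", "Ba", "Ca"],
   ["3a", "8a", "Aa"],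
   ["1b", "2b", "3b"],
   ["6b", "9b", "Ab"],
   ["4b", "5b", "7b", "Bc"],
   ["8a", "9a"],
   ["3a", "9a"],
   ["2a", "4a", "5a", "6a", "7a", "9a", "Aa", "Bb"]]

def pvIndicator (s : String) : List Int :=
  (pvPatterns.map (fun pats => if pats.any (fun p => PySem.Str.isIn p s) then (1 : Int) else 0)) ++
  [if PySem.Str.isIn "d" s || (PySem.Str.isIn "c" s && !PySem.Str.isIn "B" s) || PySem.Str.isIn "12b" s
   then (1 : Int) else 0]

def countYaku_alt (cards : List String) : List Int :=
  cards.foldl (fun totals s => List.zipWith (· + ·) totals (pvIndicator s)) (List.replicate 9 0)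

-- ===== PRECONDITION & SPEC =====
def Spec_countYaku (cards : List String) (out : List Int) : Prop := out = countYaku_alt cards
instance (cards : List String) (out : List Int) : Decidable (Spec_countYaku cards out) := by unfold Spec_countYaku; infer_instance

-- ===== CLAIM (what is proved, stated in full; the proofs are below) =====
def Claim_equal_countYaku : Prop := ∀ (cards : List String), Dom_countYaku cards → Spec_countYaku cards (countYaku cards)

-- ===== LEMMAS AND PROOFS =====
theorem pvIndicator_eq (s : String) :
    pvIndicator s =
      [if yaku1 s then 1 else 0, if yaku2 s then 1 else 0, if yaku3 s then 1 else 0,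
       if yaku4 s then 1 else 0, if yaku5 s then 1 else 0, if yaku6 s then 1 else 0,
       if yaku7 s then 1 else 0, if yaku8 s then 1 else 0, if yaku9 s then 1 else 0] := by
  simp [pvIndicator, pvPatterns, yaku1, yaku2, yaku3, yaku4, yaku5, yaku6, yaku7, yaku8, yaku9,
    Bool.or_assoc]

theorem pvFoldl_eq (cards : List String) :
    ∀ (a0 a1 a2 a3 a4 a5 a6 a7 a8 : Int),
    cards.foldl (fun totals s => List.zipWith (· + ·) totals (pvIndicator s))
        [a0, a1, a2, a3, a4, a5, a6, a7, a8] =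
      [a0 + (cards.countP yaku1 : Int), a1 + (cards.countP yaku2 : Int),
       a2 + (cards.countP yaku3 : Int), a3 + (cards.countP yaku4 : Int),
       a4 + (cards.countP yaku5 : Int), a5 + (cards.countP yaku6 : Int),
       a6 + (cards.countP yaku7 : Int), a7 + (cards.countP yaku8 : Int),
       a8 + (cards.countP yaku9 : Int)] := by
  induction cards with
  | nil => intro a0 a1 a2 a3 a4 a5 a6 a7 a8; simp
  | cons s t ih =>
    intro a0 a1 a2 a3 a4 a5 a6 a7 a8
    rw [List.foldl_cons]
    have hz : List.zipWith (· + ·) [a0, a1, a2, a3, a4, a5, a6, a7, a8] (pvIndicator s) =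
        [a0 + (if yaku1 s then 1 else 0), a1 + (if yaku2 s then 1 else 0),
         a2 + (if yaku3 s then 1 else 0), a3 + (if yaku4 s then 1 else 0),
         a4 + (if yaku5 s then 1 else 0), a5 + (if yaku6 s then 1 else 0),
         a6 + (if yaku7 s then 1 else 0), a7 + (if yaku8 s then 1 else 0),
         a8 + (if yaku9 s then 1 else 0)] := by
      simp [pvIndicator_eq]
    rw [hz, ih]
    simp only [List.countP_cons, List.cons.injEq, and_true]
    refine ⟨?_, ?_, ?_, ?_, ?_, ?_, ?_, ?_, ?_⟩ <;> (push_cast; split_ifs <;> ring)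

-- ===== VERDICT (by name: the statement is the Claim_ definition above) =====
theorem countYaku_spec : Claim_equal_countYaku := by
  intro cards _
  unfold Spec_countYaku countYaku countYaku_alt
  show _ = cards.foldl _ [0,0,0,0,0,0,0,0,0]
  rw [pvFoldl_eq]
  simp [List.countP_eq_length_filter]
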